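-- pv_equiv track=rewrite | github.com/ddanh2436/Futoshiki-Logic-Project | Source/futoshiki_ui.py | run_backward_chaining
-- ===== SOURCE A (Python) =====
-- def get_var_id(i, j, v, N):
--     return (i-1)*N**2 + (j-1)*N + v
--
-- def build_horn_kb(clauses):
--     horn = {}
--     for c in clauses:
--         pos = [l for l in c if l > 0]
--         neg = [-l for l in c if l < 0]
--         if len(pos) == 1:
--             h = pos[0]
--             horn.setdefault(h, []).append(neg)
--     return horn
--
-- def run_backward_chaining(KB, i, j, v, N):
--     horn = build_horn_kb(KB)
--     target = get_var_id(i, j, v, N)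
--     stats = [0]
--     def bc(query, visited):
--         stats[0] += 1
--         if not query: return True
--         q = query[0]; rest = query[1:]
--         if q in visited: return False
--         visited.add(q)
--         if q in horn:
--             for body in horn[q]:
--                 if bc(body + rest, visited.copy()): return True
--         visited.remove(q)
--         return False
--     res = bc([target], set())
--     return res, stats[0]
-- ===== SOURCE B (Python) =====
-- def run_backward_chaining(KB, i, j, v, N):
--     rules = []
--     for c in KB:
--         pos = [l for l in c if l > 0]
--         if len(pos) == 1:
--             rules.append((pos[0], [-l for l in c if l < 0]))
--     target = ((i - 1) * N + (j - 1)) * N + v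
--     count = 0
--     stack = [([target], frozenset())]
--     while stack:
--         query, visited = stack.pop()
--         count += 1
--         if not query:
--             return True, count
--         q = query[0]
--         if q in visited:
--             continue
--         nv = visited | {q}
--         children = [(body + query[1:], nv) for (h, body) in rules if h == q]
--         stack.extend(reversed(children))
--     return False, count
-- ===== Notes on version B (the rewrite author's own statement) =====
-- stated objective: alternative
-- what changed: A's recursive bc over a horn dict (setdefault-built, visited.copy() per child) is replaced by an iterative DFS over an explicit stack of (query, visited) frames with the horn knowledge kept as a flat (head, body) rule list queried by filtering, counting each popped frame and returning on the first empty query; same boolean and identical call count.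
import Mathlib
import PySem

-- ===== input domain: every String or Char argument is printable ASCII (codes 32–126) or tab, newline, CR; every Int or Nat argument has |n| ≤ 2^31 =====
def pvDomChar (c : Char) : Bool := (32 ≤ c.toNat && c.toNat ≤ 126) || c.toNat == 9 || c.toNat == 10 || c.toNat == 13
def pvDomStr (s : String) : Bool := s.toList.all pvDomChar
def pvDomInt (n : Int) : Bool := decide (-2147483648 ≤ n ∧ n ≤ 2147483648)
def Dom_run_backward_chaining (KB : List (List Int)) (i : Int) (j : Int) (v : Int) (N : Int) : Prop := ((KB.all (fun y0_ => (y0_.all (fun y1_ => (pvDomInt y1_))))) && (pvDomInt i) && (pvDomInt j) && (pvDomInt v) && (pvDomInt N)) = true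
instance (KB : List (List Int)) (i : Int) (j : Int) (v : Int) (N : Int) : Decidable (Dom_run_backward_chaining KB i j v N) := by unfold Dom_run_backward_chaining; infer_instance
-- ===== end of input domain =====

-- B replaces A's recursive search over a horn DICT by an explicit-stack DFS over a flat
-- rule LIST (lookup by filtering), with identical call counting (objective: alternative).

-- ===== PORT A =====
def pvGetVarId (i j v N : Int) : Int := (i - 1) * N ^ 2 + (j - 1) * N + v

def pvBuildHorn (clauses : List (List Int)) : PySem.Dict Int (List (List Int)) :=
  clauses.foldl (fun horn c =>
    let pos := c.filter (fun l => decide (l > 0))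
    let neg := (c.filter (fun l => decide (l < 0))).map (fun l => -l)
    -- horn.setdefault(h, []).append(neg) = Dict.modify h [] (· ++ [neg]); pos[0] = pos.headD 0 under the length-1 guard
    if pos.length == 1 then horn.modify (pos.headD 0) [] (fun bs => bs ++ [neg]) else horn)
    PySem.Dict.empty

-- termination measure for A's recursion: number of horn keys not yet visited
def pvMu (keys : List Int) (visited : PySem.Set Int) : Nat :=
  (keys.filter (fun k => !(PySem.Set.contains visited k))).length

lemma pv_mem_keys_of_get?_eq_some {horn : PySem.Dict Int (List (List Int))} {q : Int}
    {bodies : List (List Int)} (h : horn.get? q = some bodies) : q ∈ horn.keys := by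
  by_contra hq
  rw [(PySem.Dict.get?_eq_none_iff_not_mem_keys _ _).2 hq] at h
  simp at h

lemma pvMu_add_lt {keys : List Int} {visited : PySem.Set Int} {q : Int}
    (hq : q ∈ keys) (hnv : ¬ (PySem.Set.contains visited q = true)) :
    pvMu keys (PySem.Set.add visited q) < pvMu keys visited := by
  unfold pvMu
  have hsplit : keys.filter (fun k => !(PySem.Set.contains (PySem.Set.add visited q) k)) =
      (keys.filter (fun k => !(PySem.Set.contains visited k))).filter
        (fun k => !(PySem.Set.contains (PySem.Set.add visited q) k)) := by
    rw [List.filter_filter]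
    apply List.filter_congr
    intro x _
    by_cases hx : (!(PySem.Set.contains (PySem.Set.add visited q) x)) = true
    · simp [PySem.Set.mem_add]; tauto
    · simp [PySem.Set.mem_add]; tauto
  rw [hsplit]
  apply List.length_filter_lt_length_iff_exists.2
  refine ⟨q, List.mem_filter.2 ⟨hq, by simp at hnv ⊢; simp [hnv]⟩, ?_⟩
  simp [PySem.Set.mem_add]

def pvBc (horn : PySem.Dict Int (List (List Int))) (query : List Int)
    (visited : PySem.Set Int) (stats : Int) : Bool × Int :=
  match query with
  | [] => (true, stats + 1)
  | q :: rest =>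
    if hc : PySem.Set.contains visited q then (false, stats + 1)
    else
      match hsome : horn.get? q with
      | some bodies =>
        -- 'for body in horn[q]: if bc(body+rest, visited.copy()): return True' as an early-exit fold
        bodies.foldl
          (fun acc b => if acc.1 then acc
            else pvBc horn (b ++ rest) (PySem.Set.add visited q) acc.2)
          (false, stats + 1)
      | none => (false, stats + 1)
termination_by pvMu horn.keys visited
decreasing_by
  exact pvMu_add_lt (pv_mem_keys_of_get?_eq_some hsome) hc

def run_backward_chaining (KB : List (List Int)) (i : Int) (j : Int) (v : Int) (N : Int) : Bool × Int :=
  let horn := pvBuildHorn KB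
  let target := pvGetVarId i j v N
  pvBc horn [target] PySem.Set.empty 0

-- ===== PORT B =====
-- Source B keeps the horn rules as a flat list of (head, body) pairs (no dict)
def bRules (KB : List (List Int)) : List (Int × List Int) :=
  KB.foldl (fun rs c =>
    let pos := c.filter (fun l => decide (l > 0))
    if pos.length == 1 then rs ++ [(pos.headD 0, (c.filter (fun l => decide (l < 0))).map (fun l => -l))]
    else rs) []

-- stack-machine termination: unseen rule heads bound the depth, rule count bounds the fan-out
def bUnseen (rules : List (Int × List Int)) (visited : PySem.Set Int) : Nat :=
  ((rules.map Prod.fst).filter (fun h => !(PySem.Set.contains visited h))).length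

def bWeight (rules : List (Int × List Int)) (fr : List Int × PySem.Set Int) : Nat :=
  (rules.length + 1) ^ bUnseen rules fr.2

def bMeasure (rules : List (Int × List Int)) (stack : List (List Int × PySem.Set Int)) : Nat :=
  (stack.map (bWeight rules)).sum

lemma bMeasure_tail_lt (rules : List (Int × List Int)) (fr : List Int × PySem.Set Int)
    (tl : List (List Int × PySem.Set Int)) :
    bMeasure rules tl < bMeasure rules (fr :: tl) := by
  have : 0 < bWeight rules fr := Nat.pow_pos (Nat.succ_pos _)
  simp [bMeasure]; omega

lemma bUnseen_add_lt {rules : List (Int × List Int)} {visited : PySem.Set Int} {q : Int}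
    (hq : q ∈ rules.map Prod.fst) (hnv : ¬ (PySem.Set.contains visited q = true)) :
    bUnseen rules (PySem.Set.add visited q) < bUnseen rules visited := by
  unfold bUnseen
  have hsplit : (rules.map Prod.fst).filter (fun h => !(PySem.Set.contains (PySem.Set.add visited q) h)) =
      ((rules.map Prod.fst).filter (fun h => !(PySem.Set.contains visited h))).filter
        (fun h => !(PySem.Set.contains (PySem.Set.add visited q) h)) := by
    rw [List.filter_filter]
    apply List.filter_congr
    intro x _
    by_cases hx : (!(PySem.Set.contains (PySem.Set.add visited q) x)) = true
    · simp [PySem.Set.mem_add]; tauto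
    · simp [PySem.Set.mem_add]; tauto
  rw [hsplit]
  apply List.length_filter_lt_length_iff_exists.2
  refine ⟨q, List.mem_filter.2 ⟨hq, by simp at hnv ⊢; simp [hnv]⟩, ?_⟩
  simp [PySem.Set.mem_add]

lemma bMeasure_expand_lt (rules : List (Int × List Int)) (q : Int) (rest : List Int)
    (visited : PySem.Set Int) (tl : List (List Int × PySem.Set Int))
    (hnv : ¬ (PySem.Set.contains visited q = true)) :
    bMeasure rules
      (((rules.filter (fun r => r.1 == q)).map
          (fun r => (r.2 ++ rest, PySem.Set.add visited q))) ++ tl)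
      < bMeasure rules ((q :: rest, visited) :: tl) := by
  by_cases hf : rules.filter (fun r => r.1 == q) = []
  · have : 0 < bWeight rules (q :: rest, visited) := Nat.pow_pos (Nat.succ_pos _)
    simp [hf, bMeasure]; omega
  · have hq : q ∈ rules.map Prod.fst := by
      rcases List.exists_mem_of_ne_nil _ hf with ⟨r0, hr0⟩
      rcases List.mem_filter.1 hr0 with ⟨hmem, hbeq⟩
      have : r0.1 = q := by simpa using hbeq
      exact this ▸ List.mem_map_of_mem hmem
    have hlt : bUnseen rules (PySem.Set.add visited q) < bUnseen rules visited :=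
      bUnseen_add_lt hq hnv
    have hlen : (rules.filter (fun r => r.1 == q)).length ≤ rules.length :=
      List.length_filter_le _ _
    simp only [bMeasure, List.map_append, List.map_map, List.sum_append, List.map_cons,
      List.sum_cons]
    have hconst : (((rules.filter (fun r => r.1 == q)).map ((bWeight rules) ∘
        (fun r => (r.2 ++ rest, PySem.Set.add visited q))))).sum
        = (rules.filter (fun r => r.1 == q)).length *
            (rules.length + 1) ^ bUnseen rules (PySem.Set.add visited q) := by
      simp only [Function.comp_def, bWeight, List.map_const', List.sum_replicate, smul_eq_mul]
    rw [hconst]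
    have hkey : (rules.filter (fun r => r.1 == q)).length *
        (rules.length + 1) ^ bUnseen rules (PySem.Set.add visited q)
        < bWeight rules (q :: rest, visited) := by
      calc (rules.filter (fun r => r.1 == q)).length *
            (rules.length + 1) ^ bUnseen rules (PySem.Set.add visited q)
          ≤ rules.length * (rules.length + 1) ^ bUnseen rules (PySem.Set.add visited q) :=
            Nat.mul_le_mul_right _ hlen
        _ < (rules.length + 1) * (rules.length + 1) ^ bUnseen rules (PySem.Set.add visited q) := by
            have := Nat.pow_pos (n := bUnseen rules (PySem.Set.add visited q))
              (Nat.succ_pos rules.length)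
            exact Nat.mul_lt_mul_of_lt_of_le (Nat.lt_succ_self _) le_rfl this
        _ = (rules.length + 1) ^ (bUnseen rules (PySem.Set.add visited q) + 1) := by
            rw [pow_succ]; ring
        _ ≤ (rules.length + 1) ^ bUnseen rules visited :=
            Nat.pow_le_pow_right (Nat.succ_le_succ (Nat.zero_le _)) hlt
    omega

-- children = [(body + query[1:], nv) for (h, body) in rules if h == q]
def bChildren (rules : List (Int × List Int)) (q : Int) (rest : List Int)
    (nv : PySem.Set Int) : List (List Int × PySem.Set Int) :=
  (rules.filter (fun r => r.1 == q)).map (fun r => (r.2 ++ rest, nv))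

lemma bChildren_expand_lt (rules : List (Int × List Int)) (q : Int) (rest : List Int)
    (visited : PySem.Set Int) (tl : List (List Int × PySem.Set Int))
    (hnv : ¬ (PySem.Set.contains visited q = true)) :
    bMeasure rules (bChildren rules q rest (PySem.Set.add visited q) ++ tl)
      < bMeasure rules ((q :: rest, visited) :: tl) :=
  bMeasure_expand_lt rules q rest visited tl hnv

-- the while-loop: pop a frame, count it, succeed / skip / expand by filtering the rule list
def bLoop (rules : List (Int × List Int)) (stack : List (List Int × PySem.Set Int))
    (count : Int) : Bool × Int :=
  match stack with
  | [] => (false, count)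
  | (query, visited) :: tl =>
    match query with
    | [] => (true, count + 1)
    | q :: rest =>
      if hc : PySem.Set.contains visited q then bLoop rules tl (count + 1)
      else
        -- python pushes reversed(children) on the back and pops from the back;
        -- with the Lean list head as top of stack this prepends children in order
        bLoop rules (bChildren rules q rest (PySem.Set.add visited q) ++ tl) (count + 1)
termination_by bMeasure rules stack
decreasing_by
  · exact bMeasure_tail_lt _ _ _
  · exact bChildren_expand_lt _ _ _ _ _ hc

def run_backward_chaining_alt (KB : List (List Int)) (i : Int) (j : Int) (v : Int) (N : Int) : Bool × Int :=
  let rules := bRules KB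
  let target := ((i - 1) * N + (j - 1)) * N + v
  bLoop rules [([target], PySem.Set.empty)] 0

-- ===== PRECONDITION & SPEC =====
def Spec_run_backward_chaining (KB : List (List Int)) (i : Int) (j : Int) (v : Int) (N : Int) (out : Bool × Int) : Prop := out = run_backward_chaining_alt KB i j v N
instance (KB : List (List Int)) (i : Int) (j : Int) (v : Int) (N : Int) (out : Bool × Int) : Decidable (Spec_run_backward_chaining KB i j v N out) := by unfold Spec_run_backward_chaining; infer_instance

-- ===== CLAIM (what is proved, stated in full; the proofs are below) =====
def Claim_equal_run_backward_chaining : Prop := ∀ (KB : List (List Int)) (i : Int) (j : Int) (v : Int) (N : Int), Dom_run_backward_chaining KB i j v N → Spec_run_backward_chaining KB i j v N (run_backward_chaining KB i j v N)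

-- ===== LEMMAS AND PROOFS =====

-- the rule extracted from one clause (proof-side only; shared shape of both builds)
def pvToRule (c : List Int) : Option (Int × List Int) :=
  let pos := c.filter (fun l => decide (l > 0))
  if pos.length == 1 then some (pos.headD 0, (c.filter (fun l => decide (l < 0))).map (fun l => -l))
  else none

lemma pvBuildHorn_go (KB : List (List Int)) :
    ∀ d, KB.foldl (fun (horn : PySem.Dict Int (List (List Int))) c =>
      let pos := c.filter (fun l => decide (l > 0))
      let neg := (c.filter (fun l => decide (l < 0))).map (fun l => -l)
      if pos.length == 1 then horn.modify (pos.headD 0) [] (fun bs => bs ++ [neg]) else horn) d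
    = (KB.filterMap pvToRule).foldl (fun d p => d.modify p.1 [] (fun bs => bs ++ [p.2])) d := by
  induction KB with
  | nil => intro d; rfl
  | cons c KB ih =>
    intro d
    by_cases hg : ((c.filter (fun l => decide (l > 0))).length == 1) = true
    · have hrule : pvToRule c = some ((c.filter (fun l => decide (l > 0))).headD 0,
          (c.filter (fun l => decide (l < 0))).map (fun l => -l)) := by
        simp only [pvToRule]; rw [if_pos hg]
      simp only [List.foldl_cons, List.filterMap_cons, hrule]
      rw [ih]
      simp only [hg, if_true]
    · have hrule : pvToRule c = none := by
        simp only [pvToRule]; rw [if_neg hg]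
      simp only [List.foldl_cons, List.filterMap_cons, hrule]
      rw [ih]
      simp [hg]

lemma bRules_go (KB : List (List Int)) :
    ∀ rs, KB.foldl (fun rs c =>
      let pos := c.filter (fun l => decide (l > 0))
      if pos.length == 1 then
        rs ++ [(pos.headD 0, (c.filter (fun l => decide (l < 0))).map (fun l => -l))]
      else rs) rs
    = rs ++ KB.filterMap pvToRule := by
  induction KB with
  | nil => intro rs; simp
  | cons c KB ih =>
    intro rs
    by_cases hg : ((c.filter (fun l => decide (l > 0))).length == 1) = true
    · have hrule : pvToRule c = some ((c.filter (fun l => decide (l > 0))).headD 0,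
          (c.filter (fun l => decide (l < 0))).map (fun l => -l)) := by
        simp only [pvToRule]; rw [if_pos hg]
      simp only [List.foldl_cons, List.filterMap_cons, hrule]
      rw [ih]
      simp only [hg, if_true]
      simp
    · have hrule : pvToRule c = none := by
        simp only [pvToRule]; rw [if_neg hg]
      simp only [List.foldl_cons, List.filterMap_cons, hrule]
      rw [ih]
      simp [hg]

-- bridge: the dict A builds and the rule list B builds answer every lookup identically
lemma pv_horn_eq_rules (KB : List (List Int)) (q : Int) :
    (pvBuildHorn KB).getD q [] = ((bRules KB).filter (fun r => r.1 == q)).map (fun r => r.2) := by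
  unfold pvBuildHorn bRules
  rw [pvBuildHorn_go, bRules_go, List.nil_append,
    PySem.Dict.getD_foldl_modify_append, PySem.Dict.getD_empty, List.nil_append]

lemma pv_foldl_true (horn : PySem.Dict Int (List (List Int))) (rest : List Int)
    (v' : PySem.Set Int) :
    ∀ (bs : List (List Int)) (s : Int),
      bs.foldl (fun acc b => if acc.1 then acc else pvBc horn (b ++ rest) v' acc.2) (true, s)
        = (true, s) := by
  intro bs
  induction bs with
  | nil => intro s; rfl
  | cons b bs ih => intro s; rw [List.foldl_cons]; simpa using ih s

-- the stack machine unwinds one frame exactly as one call of A's bc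
lemma bLoop_cons (KB : List (List Int)) :
    ∀ (n : Nat) (query : List Int) (visited : PySem.Set Int)
      (tail : List (List Int × PySem.Set Int)) (stats : Int),
      bMeasure (bRules KB) ((query, visited) :: tail) ≤ n →
      bLoop (bRules KB) ((query, visited) :: tail) stats =
        (if (pvBc (pvBuildHorn KB) query visited stats).1 then pvBc (pvBuildHorn KB) query visited stats
         else bLoop (bRules KB) tail (pvBc (pvBuildHorn KB) query visited stats).2) := by
  intro n
  induction n using Nat.strong_induction_on with
  | _ n ih =>
    intro query visited tail stats hle
    cases query with
    | nil => simp [bLoop, pvBc]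
    | cons q rest =>
      by_cases hc : PySem.Set.contains visited q = true
      · have hqm : q ∈ visited := (PySem.Set.contains_iff _ _).1 hc
        simp [bLoop, pvBc, hqm]
      · have hchild : bChildren (bRules KB) q rest (PySem.Set.add visited q)
            = ((pvBuildHorn KB).getD q []).map (fun b => (b ++ rest, PySem.Set.add visited q)) := by
          unfold bChildren
          rw [pv_horn_eq_rules, List.map_map]
          rfl
        cases hg : (pvBuildHorn KB).get? q with
        | none =>
          have hgd : (pvBuildHorn KB).getD q [] = [] := PySem.Dict.getD_of_get?_eq_none _ _ hg
          have hbceq : pvBc (pvBuildHorn KB) (q :: rest) visited stats = (false, stats + 1) := by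
            rw [pvBc, dif_neg hc]
            split
            · rename_i bodies heq; rw [hg] at heq; cases heq
            · rfl
          rw [hbceq, bLoop, dif_neg hc, hchild, hgd]
          simp
        | some bodies =>
          have hgd : (pvBuildHorn KB).getD q [] = bodies := PySem.Dict.getD_of_get?_eq_some _ _ hg
          have hexp := bChildren_expand_lt (bRules KB) q rest visited tail hc
          rw [hchild, hgd] at hexp
          have hltn : bMeasure (bRules KB)
              ((bodies.map (fun b => (b ++ rest, PySem.Set.add visited q))) ++ tail) < n :=
            lt_of_lt_of_le hexp hle
          have inner : ∀ (bs : List (List Int)) (s : Int),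
              bMeasure (bRules KB)
                ((bs.map (fun b => (b ++ rest, PySem.Set.add visited q))) ++ tail) < n →
              bLoop (bRules KB) ((bs.map (fun b => (b ++ rest, PySem.Set.add visited q))) ++ tail) s =
                (if (bs.foldl (fun acc b => if acc.1 then acc
                      else pvBc (pvBuildHorn KB) (b ++ rest) (PySem.Set.add visited q) acc.2) (false, s)).1
                 then bs.foldl (fun acc b => if acc.1 then acc
                      else pvBc (pvBuildHorn KB) (b ++ rest) (PySem.Set.add visited q) acc.2) (false, s)
                 else bLoop (bRules KB) tail
                   (bs.foldl (fun acc b => if acc.1 then acc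
                      else pvBc (pvBuildHorn KB) (b ++ rest) (PySem.Set.add visited q) acc.2) (false, s)).2) := by
            intro bs
            induction bs with
            | nil => intro s _; simp
            | cons b bs ihb =>
              intro s hm
              rw [List.map_cons, List.cons_append] at hm ⊢
              rw [ih (bMeasure (bRules KB)
                    ((b ++ rest, PySem.Set.add visited q) ::
                      ((bs.map (fun b => (b ++ rest, PySem.Set.add visited q))) ++ tail))) hm
                    (b ++ rest) (PySem.Set.add visited q)
                    ((bs.map (fun b => (b ++ rest, PySem.Set.add visited q))) ++ tail) s le_rfl]
              rcases hbc : pvBc (pvBuildHorn KB) (b ++ rest) (PySem.Set.add visited q) s with ⟨r, s2⟩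
              cases r with
              | true =>
                rw [List.foldl_cons]
                simp [hbc, pv_foldl_true (pvBuildHorn KB) rest (PySem.Set.add visited q) bs]
              | false =>
                rw [List.foldl_cons]
                simp only [hbc, Bool.false_eq_true, if_false]
                exact ihb s2 (lt_trans (bMeasure_tail_lt _ _ _) hm)
          have hrun : bLoop (bRules KB) ((q :: rest, visited) :: tail) stats =
              bLoop (bRules KB)
                ((bodies.map (fun b => (b ++ rest, PySem.Set.add visited q))) ++ tail)
                (stats + 1) := by
            rw [bLoop, dif_neg hc, hchild, hgd]
          have hbc : pvBc (pvBuildHorn KB) (q :: rest) visited stats =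
              bodies.foldl (fun acc b => if acc.1 then acc
                else pvBc (pvBuildHorn KB) (b ++ rest) (PySem.Set.add visited q) acc.2)
                (false, stats + 1) := by
            rw [pvBc, dif_neg hc]
            split
            · rename_i bodies' heq; rw [hg] at heq; injection heq with h'; subst h'; rfl
            · rename_i heq; rw [hg] at heq; cases heq
          rw [hrun, hbc]
          exact inner bodies (stats + 1) hltn

lemma pv_target_eq (i j v N : Int) : pvGetVarId i j v N = ((i - 1) * N + (j - 1)) * N + v := by
  unfold pvGetVarId; ring

-- ===== VERDICT (by name: the statement is the Claim_ definition above) =====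
theorem run_backward_chaining_spec : Claim_equal_run_backward_chaining := by
  unfold Claim_equal_run_backward_chaining
  intro KB i j v N _
  unfold Spec_run_backward_chaining run_backward_chaining run_backward_chaining_alt
  rw [← pv_target_eq]
  have h := bLoop_cons KB
    (bMeasure (bRules KB) [([pvGetVarId i j v N], PySem.Set.empty)])
    [pvGetVarId i j v N] PySem.Set.empty [] 0 le_rfl
  rw [h]
  rcases hbc : pvBc (pvBuildHorn KB) [pvGetVarId i j v N] PySem.Set.empty 0 with ⟨r, s⟩
  cases r <;> simp [bLoop]
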